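-- pv_equiv track=rewrite | github.com/validmind/validmind-library | scripts/generate_quarto_docs.py | format_rst_docstring
-- ===== SOURCE A (Python) =====
-- def format_rst_docstring(docstring: str) -> str:
--     """Format an RST-style docstring from JSON format back to proper structure."""
--
--     # Split on ":param" and ":return:" to separate sections
--     parts = []
--     current = []
--
--     for part in docstring.split():
--         if part.startswith(':param') or part.startswith(':return:'):
--             if current:
--                 parts.append(' '.join(current))
--             current = [part]
--         else:
--             current.append(part)
--     if current:
--         parts.append(' '.join(current))
--
--     # Join with newlines
--     result = '\n'.join(parts)
--     return result
-- ===== SOURCE B (Python) =====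
-- import re
--
--
-- def format_rst_docstring(docstring: str) -> str:
--     """Format an RST-style docstring from JSON format back to proper structure."""
--     # Normalize all whitespace runs to single spaces, then put a newline
--     # before every token that starts a new section (:param... or :return:).
--     s = ' '.join(docstring.split())
--     return re.sub(r' (?=:param|:return:)', '\n', s)
-- ===== Notes on version B (the rewrite author's own statement) =====
-- stated objective: idiomatic
-- what changed: Replaces A's explicit group-accumulation loop (build token groups, join each with spaces, join groups with newlines) by a normalize-then-substitute pass: collapse whitespace runs to single spaces once via split/join, then insert newlines with a single regex lookahead substitution.
import Mathlib
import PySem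

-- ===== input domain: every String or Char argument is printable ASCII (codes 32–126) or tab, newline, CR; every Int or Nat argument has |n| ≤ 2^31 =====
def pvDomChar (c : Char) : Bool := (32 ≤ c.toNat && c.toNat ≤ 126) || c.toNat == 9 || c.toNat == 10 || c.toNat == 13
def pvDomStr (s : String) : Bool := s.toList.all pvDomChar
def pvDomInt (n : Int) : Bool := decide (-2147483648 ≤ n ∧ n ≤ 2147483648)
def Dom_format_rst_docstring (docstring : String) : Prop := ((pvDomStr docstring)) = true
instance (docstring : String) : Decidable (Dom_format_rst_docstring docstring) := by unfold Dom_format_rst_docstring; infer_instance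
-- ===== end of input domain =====

-- B replaces A's group-accumulation loop by a normalize-then-substitute pass (idiomatic).

-- ===== PORT A =====
-- one step of A's loop over docstring.split(): flush `current` on a section marker
def fmtStep (st : List String × List String) (part : String) : List String × List String :=
  if PySem.Str.startswith part ":param" || PySem.Str.startswith part ":return:" then
    (if st.2.isEmpty then st.1 else st.1 ++ [PySem.Str.join " " st.2], [part])
  else
    (st.1, st.2 ++ [part])

def format_rst_docstring (docstring : String) : String :=
  let st := (PySem.Str.split₀ docstring).foldl fmtStep ([], [])
  let parts := if st.2.isEmpty then st.1 else st.1 ++ [PySem.Str.join " " st.2]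
  PySem.Str.join "\n" parts

-- ===== PORT B =====
-- hand port of re.sub(r' (?=:param|:return:)', '\n', s): left-to-right scan, a space whose
-- remainder starts with ':param' or ':return:' becomes '\n' (lookahead consumes nothing);
-- exact for this pattern.
def subNl : List Char → List Char
  | [] => []
  | c :: rest =>
    (if c = ' ' ∧ (PySem.Chars.startswith rest ":param".toList
                   || PySem.Chars.startswith rest ":return:".toList) then '\n' else c) :: subNl rest

def format_rst_docstring_alt (docstring : String) : String :=
  let s := PySem.Str.join " " (PySem.Str.split₀ docstring)
  String.ofList (subNl s.toList)

-- ===== PRECONDITION & SPEC =====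
def Spec_format_rst_docstring (docstring : String) (out : String) : Prop := out = format_rst_docstring_alt docstring
instance (docstring : String) (out : String) : Decidable (Spec_format_rst_docstring docstring out) := by unfold Spec_format_rst_docstring; infer_instance

-- ===== CLAIM (what is proved, stated in full; the proofs are below) =====
def Claim_equal_format_rst_docstring : Prop := ∀ (docstring : String), Dom_format_rst_docstring docstring → Spec_format_rst_docstring docstring (format_rst_docstring docstring)

-- ===== LEMMAS AND PROOFS =====

-- char-level marker test
def isMark (t : List Char) : Bool :=
  PySem.Chars.startswith t ":param".toList || PySem.Chars.startswith t ":return:".toList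

-- char-level copy of A's loop step
def stepC (st : List (List Char) × List (List Char)) (part : List Char) :
    List (List Char) × List (List Char) :=
  if isMark part then
    (if st.2.isEmpty then st.1 else st.1 ++ [PySem.Chars.join [' '] st.2], [part])
  else
    (st.1, st.2 ++ [part])

def finalizeC (st : List (List Char) × List (List Char)) : List (List Char) :=
  if st.2.isEmpty then st.1 else st.1 ++ [PySem.Chars.join [' '] st.2]

-- the groups A's loop produces from tokens ts given a pending nonempty group cur
def groupsFrom (cur : List (List Char)) : List (List Char) → List (List (List Char))
  | [] => [cur]
  | t :: rest => if isMark t then cur :: groupsFrom [t] rest else groupsFrom (cur ++ [t]) rest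

-- separator-rendered tail: one separator char before each token
def sepTail : List (List Char) → List Char
  | [] => []
  | t :: rest => (if isMark t then '\n' else ' ') :: (t ++ sepTail rest)

-- the common normal form of both programs' output
def renderC : List (List Char) → List Char
  | [] => []
  | t :: rest => t ++ sepTail rest

def pmap (st : List String × List String) : List (List Char) × List (List Char) :=
  (st.1.map String.toList, st.2.map String.toList)

lemma fmtStep_comm (st : List String × List String) (p : String) :
    pmap (fmtStep st p) = stepC (pmap st) p.toList := by
  simp only [fmtStep, stepC, pmap, isMark, PySem.Str.startswith_eq]
  split_ifs with h1 h2 h3 <;>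
    simp_all [PySem.Str.toList_join, List.isEmpty_iff]

lemma fold_comm (ts : List String) (st : List String × List String) :
    pmap (ts.foldl fmtStep st) = (ts.map String.toList).foldl stepC (pmap st) := by
  induction ts generalizing st with
  | nil => rfl
  | cons p rest ih => simp [List.foldl_cons, ih, fmtStep_comm]

lemma groupsFrom_ne_nil (cur : List (List Char)) (ts : List (List Char)) :
    groupsFrom cur ts ≠ [] := by
  induction ts generalizing cur with
  | nil => simp [groupsFrom]
  | cons t rest ih =>
    simp only [groupsFrom]
    split_ifs <;> simp [ih]

lemma foldC (ts : List (List Char)) : ∀ ps cur, cur ≠ [] →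
    finalizeC (ts.foldl stepC (ps, cur))
      = ps ++ (groupsFrom cur ts).map (PySem.Chars.join [' ']) := by
  induction ts with
  | nil =>
    intro ps cur hc
    simp [finalizeC, groupsFrom, List.isEmpty_iff, hc]
  | cons t rest ih =>
    intro ps cur hc
    simp only [List.foldl_cons, stepC, groupsFrom]
    by_cases h : isMark t = true
    · rw [if_pos h, if_pos h, if_neg (by simp [List.isEmpty_iff, hc])]
      rw [ih (ps ++ [PySem.Chars.join [' '] cur]) [t] (by simp)]
      simp
    · rw [if_neg h, if_neg h]
      exact ih ps (cur ++ [t]) (by simp)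

lemma join_append_single (cur : List (List Char)) (t : List Char) (hc : cur ≠ []) :
    PySem.Chars.join [' '] (cur ++ [t]) = PySem.Chars.join [' '] cur ++ ' ' :: t := by
  induction cur with
  | nil => simp at hc
  | cons a rest ih =>
    cases rest with
    | nil => simp [PySem.Chars.join_singleton, PySem.Chars.join_cons_cons]
    | cons b r =>
      have := ih (by simp)
      simp only [List.cons_append, PySem.Chars.join_cons_cons] at *
      simp [this]

lemma joinGroups (ts : List (List Char)) : ∀ cur, cur ≠ [] →
    PySem.Chars.join ['\n'] ((groupsFrom cur ts).map (PySem.Chars.join [' ']))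
      = PySem.Chars.join [' '] cur ++ sepTail ts := by
  induction ts with
  | nil => intro cur hc; simp [groupsFrom, sepTail, PySem.Chars.join_singleton]
  | cons t rest ih =>
    intro cur hc
    simp only [groupsFrom, sepTail]
    split_ifs with h
    · have hne := groupsFrom_ne_nil [t] rest
      obtain ⟨g, gs, hg⟩ := List.exists_cons_of_ne_nil hne
      rw [hg, List.map_cons, List.map_cons, PySem.Chars.join_cons_cons, ← List.map_cons, ← hg,
        ih [t] (by simp)]
      simp [PySem.Chars.join_singleton]
    · rw [ih (cur ++ [t]) (by simp), join_append_single cur t hc]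
      simp

-- B-side: scanning a space-free token leaves it unchanged
lemma subNl_nospace (t : List Char) (h : ' ' ∉ t) : subNl t = t := by
  induction t with
  | nil => rfl
  | cons c rest ih =>
    simp only [List.mem_cons, not_or] at h
    simp [subNl, ih h.2, Ne.symm h.1]

lemma startswith_append_space (m : List Char) : ∀ (u w : List Char), ' ' ∉ m → ' ' ∉ u →
    PySem.Chars.startswith (u ++ ' ' :: w) m = PySem.Chars.startswith u m := by
  induction m with
  | nil =>
    intro u w _ _
    rw [Bool.eq_iff_iff, PySem.Chars.startswith_iff, PySem.Chars.startswith_iff]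
    simp
  | cons a m' ih =>
    intro u w hm hu
    simp only [List.mem_cons, not_or] at hm
    cases u with
    | nil =>
      simp only [List.nil_append]
      rw [Bool.eq_iff_iff, PySem.Chars.startswith_iff, PySem.Chars.startswith_iff]
      simp [List.cons_prefix_cons, Ne.symm hm.1]
    | cons b u' =>
      simp only [List.mem_cons, not_or] at hu
      simp only [List.cons_append]
      rw [Bool.eq_iff_iff, PySem.Chars.startswith_iff, PySem.Chars.startswith_iff]
      simp only [List.cons_prefix_cons]
      rw [← PySem.Chars.startswith_iff, ← PySem.Chars.startswith_iff, ih u' w hm.2 hu.2]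

lemma isMark_append_space (u w : List Char) (hu : ' ' ∉ u) :
    isMark (u ++ ' ' :: w) = isMark u := by
  rw [isMark, isMark,
    startswith_append_space _ u w (by decide) hu,
    startswith_append_space _ u w (by decide) hu]

lemma subNl_split (t : List Char) (w : List Char) (h : ' ' ∉ t) :
    subNl (t ++ ' ' :: w) = t ++ (if isMark w then '\n' else ' ') :: subNl w := by
  induction t with
  | nil => simp [subNl, isMark]
  | cons c rest ih =>
    simp only [List.mem_cons, not_or] at h
    simp [subNl, ih h.2, Ne.symm h.1]

lemma subNl_join (ts : List (List Char)) (h : ∀ u ∈ ts, ' ' ∉ u) :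
    subNl (PySem.Chars.join [' '] ts) = renderC ts := by
  induction ts with
  | nil => simp [PySem.Chars.join_nil, subNl, renderC]
  | cons t rest ih =>
    cases rest with
    | nil =>
      simp only [renderC, sepTail, List.append_nil, PySem.Chars.join_singleton]
      exact subNl_nospace t (h t (by simp))
    | cons u r =>
      have ht : ' ' ∉ t := h t (by simp)
      have hu : ' ' ∉ u := h u (by simp)
      have hjoin : PySem.Chars.join [' '] (t :: u :: r) = t ++ ' ' :: PySem.Chars.join [' '] (u :: r) := by
        rw [PySem.Chars.join_cons_cons]; simp
      rw [hjoin, subNl_split t _ ht, ih (by intro x hx; exact h x (by simp [hx]))]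
      have hmark : isMark (PySem.Chars.join [' '] (u :: r)) = isMark u := by
        cases r with
        | nil => rw [PySem.Chars.join_singleton]
        | cons v r' =>
          rw [PySem.Chars.join_cons_cons]
          have : u ++ [' '] ++ PySem.Chars.join [' '] (v :: r') = u ++ ' ' :: PySem.Chars.join [' '] (v :: r') := by simp
          rw [this, isMark_append_space u _ hu]
      rw [hmark]
      simp [renderC, sepTail]

-- tokens from split() contain no space
lemma split₀_go_nospace : ∀ (s cur : List Char) (acc : List (List Char)),
    ' ' ∉ cur → (∀ t ∈ acc, ' ' ∉ t) → ∀ t ∈ PySem.Chars.split₀.go s cur acc, ' ' ∉ t := by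
  intro s
  induction s with
  | nil =>
    intro cur acc hc ha t ht
    simp only [PySem.Chars.split₀.go] at ht
    split_ifs at ht with h
    · simp only [List.mem_reverse] at ht; exact ha t ht
    · simp only [List.mem_reverse, List.mem_cons] at ht
      rcases ht with h1 | h2
      · subst h1; simpa using hc
      · exact ha t h2
  | cons c rest ih =>
    intro cur acc hc ha t ht
    simp only [PySem.Chars.split₀.go] at ht
    split_ifs at ht with h1 h2
    · exact ih [] acc (by simp) ha t ht
    · refine ih [] (cur.reverse :: acc) (by simp) ?_ t ht
      intro x hx
      rcases List.mem_cons.mp hx with h3 | h4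
      · subst h3; simpa using hc
      · exact ha x h4
    · refine ih (c :: cur) acc ?_ ha t ht
      intro hx
      rcases List.mem_cons.mp hx with h3 | h4
      · exact h1 (by rw [← h3]; decide)
      · exact hc h4

lemma split₀_nospace (s : List Char) : ∀ t ∈ PySem.Chars.split₀ s, ' ' ∉ t := by
  have := split₀_go_nospace s [] [] (by simp) (by simp)
  simpa [PySem.Chars.split₀] using this

lemma stepC_nil (t : List Char) : stepC ([], []) t = ([], [t]) := by
  simp only [stepC]
  split_ifs <;> simp_all

lemma main_chars (ts : List (List Char)) (h : ∀ u ∈ ts, ' ' ∉ u) :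
    PySem.Chars.join ['\n'] (finalizeC (ts.foldl stepC ([], [])))
      = subNl (PySem.Chars.join [' '] ts) := by
  rw [subNl_join ts h]
  cases ts with
  | nil => simp [finalizeC, PySem.Chars.join_nil, renderC]
  | cons t rest =>
    rw [List.foldl_cons, stepC_nil, foldC rest [] [t] (by simp), List.nil_append,
      joinGroups rest [t] (by simp), PySem.Chars.join_singleton, renderC]

-- ===== VERDICT (by name: the statement is the Claim_ definition above) =====
theorem format_rst_docstring_spec : Claim_equal_format_rst_docstring := by
  intro docstring _
  unfold Spec_format_rst_docstring format_rst_docstring format_rst_docstring_alt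
  apply String.toList_inj.mp
  rw [String.toList_ofList]
  have hts : (PySem.Str.split₀ docstring).map String.toList = PySem.Chars.split₀ docstring.toList :=
    PySem.Str.split₀_map_toList docstring
  have h1 : (PySem.Str.join "\n"
      (if ((PySem.Str.split₀ docstring).foldl fmtStep ([], [])).2.isEmpty
       then ((PySem.Str.split₀ docstring).foldl fmtStep ([], [])).1
       else ((PySem.Str.split₀ docstring).foldl fmtStep ([], [])).1
            ++ [PySem.Str.join " " ((PySem.Str.split₀ docstring).foldl fmtStep ([], [])).2])).toList
      = PySem.Chars.join ['\n'] (finalizeC (((PySem.Str.split₀ docstring).map String.toList).foldl stepC ([], []))) := by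
    rw [PySem.Str.toList_join]
    congr 1
    have hp := fold_comm (PySem.Str.split₀ docstring) ([], [])
    simp only [pmap, List.map_nil] at hp
    have hp1 := congrArg Prod.fst hp
    have hp2 := congrArg Prod.snd hp
    simp only [] at hp1 hp2
    rw [finalizeC, ← hp1, ← hp2]
    split_ifs with h1 h2 <;>
      simp_all [PySem.Str.toList_join, List.isEmpty_iff]
  have h2 : (PySem.Str.join " " (PySem.Str.split₀ docstring)).toList
      = PySem.Chars.join [' '] ((PySem.Str.split₀ docstring).map String.toList) := by
    rw [PySem.Str.toList_join]; rfl
  simp only [h2]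
  refine h1.trans ?_
  rw [hts]
  exact main_chars _ (split₀_nospace docstring.toList)
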